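-- pv_equiv track=rewrite | github.com/Ahmed-Zoher/Embedded_Systems_Projects | Iot_Connected_Cars_Project/Connection_Algorithm.py | getMinNonZero
-- ===== SOURCE A (Python) =====
-- def getMinNonZero(x):
--     min=max(x);
--     idx=-1;
--     for i in range(len(x)):
--         if (x[i]<=min and x[i]!=0):
--             idx=i;
--             min=x[i];
--     return idx;
-- ===== SOURCE B (Python) =====
-- def getMinNonZero(x):
--     nz = [v for v in x if v != 0]
--     if not nz:
--         return -1
--     m = min(nz)
--     return len(x) - 1 - x[::-1].index(m)
-- ===== Notes on version B (the rewrite author's own statement) =====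
-- stated objective: simpler
-- what changed: Replaces A's single running-min/index loop (seeded with max(x)) by a value-then-index decomposition: filter the non-zeros, take their min, and locate its last occurrence via the index of m in the reversed list.
import Mathlib
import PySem

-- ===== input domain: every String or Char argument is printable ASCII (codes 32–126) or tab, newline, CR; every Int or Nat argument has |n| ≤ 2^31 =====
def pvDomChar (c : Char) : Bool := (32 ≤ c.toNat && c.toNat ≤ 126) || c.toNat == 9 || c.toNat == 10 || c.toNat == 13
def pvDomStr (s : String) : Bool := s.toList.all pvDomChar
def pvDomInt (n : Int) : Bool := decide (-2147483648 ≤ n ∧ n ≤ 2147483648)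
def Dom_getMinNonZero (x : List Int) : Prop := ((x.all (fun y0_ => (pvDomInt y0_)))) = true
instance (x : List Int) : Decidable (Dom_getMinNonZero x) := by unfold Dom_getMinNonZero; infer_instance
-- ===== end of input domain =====

-- B replaces A's single running-min/index loop by a value-then-index decomposition
-- (min of the non-zeros, then its last occurrence via the reversed list); same cost, simpler.

-- ===== PORT A =====
def getMinNonZero (x : List Int) : Int :=
  -- min=max(x): raises ValueError on [], excluded by Pre_; the `none` value is never claimed
  match PySem.List.max? x (fun y => y) with
  | none => -1
  | some mx =>
    ((PySem.List.pyRange 0 (x.length : Int) 1).foldl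
      (fun (s : Int × Int) i =>
        let v := PySem.List.pyGetD x i 0
        if v ≤ s.2 ∧ v ≠ 0 then (i, v) else s)
      (-1, mx)).1

-- ===== PORT B =====
def getMinNonZero_alt (x : List Int) : Int :=
  let nz := x.filter (fun v => decide (v ≠ 0))
  match PySem.List.min? nz (fun y => y) with
  | none => -1
  | some m =>
    let rev := (PySem.List.slice? x none none (-1)).getD []
    ((x.length : Int) - 1) - (((PySem.List.index? rev m).getD 0 : Nat) : Int)

-- ===== PRECONDITION & SPEC =====
-- Pre_ excludes only the empty list, on which A raises ValueError (from max(x)).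
def Pre_getMinNonZero (x : List Int) : Prop := x ≠ []
instance (x : List Int) : Decidable (Pre_getMinNonZero x) := by unfold Pre_getMinNonZero; infer_instance
def pvWitness_getMinNonZero : List Int := [0, 3, 2, 3]

def Spec_getMinNonZero (x : List Int) (out : Int) : Prop := out = getMinNonZero_alt x
instance (x : List Int) (out : Int) : Decidable (Spec_getMinNonZero x out) := by unfold Spec_getMinNonZero; infer_instance

-- ===== CLAIM (what is proved, stated in full; the proofs are below) =====
def Claim_equal_getMinNonZero : Prop := ∀ (x : List Int), Dom_getMinNonZero x → Pre_getMinNonZero x → Spec_getMinNonZero x (getMinNonZero x)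


-- ===== LEMMAS AND PROOFS =====

-- A's loop, over (index, value) pairs
def loopE (l : List (Int × Int)) (s : Int × Int) : Int × Int :=
  l.foldl (fun s p => if p.2 ≤ s.2 ∧ p.2 ≠ 0 then (p.1, p.2) else s) s

-- last index of value m among the pairs, default d
def lastIdxP (l : List (Int × Int)) (m : Int) (d : Int) : Int :=
  l.foldl (fun acc p => if p.2 = m then p.1 else acc) d

-- running min of the values, seeded with a
def minVal (l : List (Int × Int)) (a : Int) : Int :=
  l.foldl (fun b p => min b p.2) a

lemma loopE_cons (p : Int × Int) (t : List (Int × Int)) (s : Int × Int) :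
    loopE (p :: t) s = loopE t (if p.2 ≤ s.2 ∧ p.2 ≠ 0 then (p.1, p.2) else s) := rfl

lemma lastIdxP_cons (p : Int × Int) (t : List (Int × Int)) (m d : Int) :
    lastIdxP (p :: t) m d = lastIdxP t m (if p.2 = m then p.1 else d) := rfl

lemma minVal_cons (p : Int × Int) (t : List (Int × Int)) (a : Int) :
    minVal (p :: t) a = minVal t (min a p.2) := rfl

lemma minVal_le_init (l : List (Int × Int)) : ∀ (a : Int), minVal l a ≤ a := by
  induction l with
  | nil => intro a; exact le_refl a
  | cons p t ih =>
    intro a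
    rw [minVal_cons]
    exact le_trans (ih (min a p.2)) (min_le_left _ _)

lemma minVal_mem (l : List (Int × Int)) : ∀ (a : Int),
    minVal l a = a ∨ ∃ p ∈ l, p.2 = minVal l a := by
  induction l with
  | nil => intro a; exact Or.inl rfl
  | cons p t ih =>
    intro a
    rw [minVal_cons]
    rcases ih (min a p.2) with h | ⟨q, hq, hq2⟩
    · rw [h]
      rcases le_total a p.2 with hle | hle
      · exact Or.inl (min_eq_left hle)
      · exact Or.inr ⟨p, List.mem_cons_self .., (min_eq_right hle).symm⟩
    · exact Or.inr ⟨q, List.mem_cons_of_mem _ hq, hq2⟩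

lemma minVal_eq_init (l : List (Int × Int)) : ∀ (a : Int), (∀ p ∈ l, a ≤ p.2) →
    minVal l a = a := by
  induction l with
  | nil => intro a _; rfl
  | cons p t ih =>
    intro a h
    rw [minVal_cons, min_eq_left (h p (List.mem_cons_self ..))]
    exact ih a (fun q hq => h q (List.mem_cons_of_mem _ hq))

lemma lastIdxP_eq_default (l : List (Int × Int)) (m : Int) : ∀ (d : Int),
    (∀ p ∈ l, p.2 ≠ m) → lastIdxP l m d = d := by
  induction l with
  | nil => intro d _; rfl
  | cons p t ih =>
    intro d h
    rw [lastIdxP_cons, if_neg (h p (List.mem_cons_self ..))]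
    exact ih d (fun q hq => h q (List.mem_cons_of_mem _ hq))

lemma lastIdxP_default_irrel (l : List (Int × Int)) (m : Int) : ∀ (d d' : Int),
    (∃ p ∈ l, p.2 = m) → lastIdxP l m d = lastIdxP l m d' := by
  induction l with
  | nil => intro d d' h; exact absurd h (by simp)
  | cons p t ih =>
    intro d d' h
    rw [lastIdxP_cons, lastIdxP_cons]
    by_cases hp : p.2 = m
    · rw [if_pos hp, if_pos hp]
    · rw [if_neg hp, if_neg hp]
      rcases h with ⟨q, hq, hq2⟩
      rcases List.mem_cons.mp hq with rfl | hq'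
      · exact absurd hq2 hp
      · exact ih d d' ⟨q, hq', hq2⟩

-- tightening the bound of the filter below the seed does not change the running min
lemma minVal_filter_bound (l : List (Int × Int)) :
    ∀ (a b : Int), a ≤ b →
    minVal (l.filter (fun p => decide (p.2 ≤ b ∧ p.2 ≠ 0))) a
      = minVal (l.filter (fun p => decide (p.2 ≤ a ∧ p.2 ≠ 0))) a := by
  induction l with
  | nil => intro a b _; rfl
  | cons p t ih =>
    intro a b hab
    by_cases h0 : p.2 = 0
    · rw [List.filter_cons_of_neg (by simp [h0]), List.filter_cons_of_neg (by simp [h0])]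
      exact ih a b hab
    · by_cases hpa : p.2 ≤ a
      · rw [List.filter_cons_of_pos (by simp [h0, le_trans hpa hab]),
            List.filter_cons_of_pos (by simp [h0, hpa]),
            minVal_cons, minVal_cons, min_eq_right hpa]
        rw [ih p.2 b (le_trans hpa hab), ih p.2 a hpa]
      · by_cases hpb : p.2 ≤ b
        · rw [List.filter_cons_of_pos (by simp [h0, hpb]),
              List.filter_cons_of_neg (by simp [h0, hpa]),
              minVal_cons, min_eq_left (le_of_lt (lt_of_not_ge hpa))]
          exact ih a b hab
        · rw [List.filter_cons_of_neg (by simp [h0, hpb]),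
              List.filter_cons_of_neg (by simp [h0, hpa])]
          exact ih a b hab

-- full characterisation of A's loop
lemma loopE_spec (l : List (Int × Int)) :
    ∀ (idx mn : Int),
    loopE l (idx, mn) =
      match l.filter (fun p => decide (p.2 ≤ mn ∧ p.2 ≠ 0)) with
      | [] => (idx, mn)
      | q :: qs => (lastIdxP l (minVal qs q.2) idx, minVal qs q.2) := by
  induction l with
  | nil => intro idx mn; rfl
  | cons p t ih =>
    intro idx mn
    by_cases hc : p.2 ≤ mn ∧ p.2 ≠ 0
    · rw [loopE_cons, if_pos hc, ih p.1 p.2,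
          List.filter_cons_of_pos (by simpa using hc)]
      dsimp only
      rcases hft : t.filter (fun q => decide (q.2 ≤ p.2 ∧ q.2 ≠ 0)) with _ | ⟨q', qs'⟩
      · -- inner filter empty: the head stays the minimum
        rw [hft]
        dsimp only
        have hmv : minVal (t.filter (fun q => decide (q.2 ≤ mn ∧ q.2 ≠ 0))) p.2 = p.2 := by
          apply minVal_eq_init
        /- every surviving value exceeds p.2 -/
          intro q hq
          rcases List.mem_filter.mp hq with ⟨hqt, hcond⟩
          by_contra hlt
          have hq2 : q.2 ≤ p.2 := le_of_not_ge (fun h => hlt h)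
          have : q ∈ t.filter (fun q => decide (q.2 ≤ p.2 ∧ q.2 ≠ 0)) :=
            List.mem_filter.mpr ⟨hqt, by simp at hcond ⊢; exact ⟨hq2, hcond.2⟩⟩
          rw [hft] at this
          exact absurd this (List.not_mem_nil)
        rw [hmv, lastIdxP_cons, if_pos rfl]
        rw [lastIdxP_eq_default]
        intro q hq hq2
        have : q ∈ t.filter (fun q => decide (q.2 ≤ p.2 ∧ q.2 ≠ 0)) :=
          List.mem_filter.mpr ⟨hq, by simp [hq2, hc.2]⟩
        rw [hft] at this
        exact absurd this (List.not_mem_nil)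
      · rw [hft]
        dsimp only
        have hq'le : q'.2 ≤ p.2 ∧ q'.2 ≠ 0 := by
          have : q' ∈ t.filter (fun q => decide (q.2 ≤ p.2 ∧ q.2 ≠ 0)) := by
            rw [hft]; exact List.mem_cons_self ..
          simpa using (List.mem_filter.mp this).2
        have hm : minVal (t.filter (fun q => decide (q.2 ≤ mn ∧ q.2 ≠ 0))) p.2
            = minVal qs' q'.2 := by
          rw [minVal_filter_bound t p.2 mn hc.1, hft, minVal_cons, min_eq_right hq'le.1]
        rw [hm, lastIdxP_cons]
        have hmem : ∃ q ∈ t, q.2 = minVal qs' q'.2 := by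
          rcases minVal_mem qs' q'.2 with h | ⟨q, hq, hq2⟩
          · refine ⟨q', ?_, h.symm ▸ rfl⟩
            have : q' ∈ t.filter (fun q => decide (q.2 ≤ p.2 ∧ q.2 ≠ 0)) := by
              rw [hft]; exact List.mem_cons_self ..
            exact (List.mem_filter.mp this).1
          · refine ⟨q, ?_, hq2⟩
            have : q ∈ t.filter (fun r => decide (r.2 ≤ p.2 ∧ r.2 ≠ 0)) := by
              rw [hft]; exact List.mem_cons_of_mem _ hq
            exact (List.mem_filter.mp this).1
        by_cases hp : p.2 = minVal qs' q'.2
        · rw [if_pos hp]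
        · rw [if_neg hp]
          rw [lastIdxP_default_irrel t (minVal qs' q'.2) idx p.1 hmem]
    · rw [loopE_cons, if_neg hc, ih idx mn,
          List.filter_cons_of_neg (by simpa using hc)]
      rcases hft : t.filter (fun q => decide (q.2 ≤ mn ∧ q.2 ≠ 0)) with _ | ⟨q', qs'⟩
      · rw [hft]
      · rw [hft]
        dsimp only
        rw [lastIdxP_cons, if_neg]
        intro hp
        have hmle : minVal qs' q'.2 ≤ mn := by
          have hq' : q' ∈ t.filter (fun q => decide (q.2 ≤ mn ∧ q.2 ≠ 0)) := by
            rw [hft]; exact List.mem_cons_self ..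
          have := (List.mem_filter.mp hq').2
          simp at this
          exact le_trans (minVal_le_init qs' q'.2) this.1
        have hmne : minVal qs' q'.2 ≠ 0 := by
          rcases minVal_mem qs' q'.2 with h | ⟨q, hq, hq2⟩
          · have hq' : q' ∈ t.filter (fun q => decide (q.2 ≤ mn ∧ q.2 ≠ 0)) := by
              rw [hft]; exact List.mem_cons_self ..
            have := (List.mem_filter.mp hq').2
            simp at this
            rw [h]; exact this.2
          · have hqmem : q ∈ t.filter (fun r => decide (r.2 ≤ mn ∧ r.2 ≠ 0)) := by
              rw [hft]; exact List.mem_cons_of_mem _ hq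
            have := (List.mem_filter.mp hqmem).2
            simp at this
            rw [← hq2]; exact this.2
        exact hc ⟨hp ▸ hmle, hp ▸ hmne⟩

-- filtering the values of an enumeration
lemma enum_filter_snd (P : Int → Bool) :
    ∀ (x : List Int) (s : Int),
    ((PySem.List.enumerate x s).filter (fun p => P p.2)).map Prod.snd = x.filter P := by
  intro x
  induction x with
  | nil => intro s; rfl
  | cons v t ih =>
    intro s
    rw [PySem.List.enumerate_cons]
    by_cases h : P v
    · simp [h, ih (s + 1)]
    · simp [h, ih (s + 1)]

-- the last index of m in x equals the expression B computes from the reversed list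
lemma lastIdxP_enum (m d : Int) :
    ∀ (x : List Int), m ∈ x →
    lastIdxP (PySem.List.enumerate x 0) m d
      = ((x.length : Int) - 1) - (((PySem.List.index? x.reverse m).getD 0 : Nat) : Int) := by
  intro x
  induction x using List.reverseRecOn with
  | nil => intro h; exact absurd h (List.not_mem_nil)
  | append_singleton ys v ih =>
    intro hm
    rw [PySem.List.enumerate_append, List.reverse_append]
    simp only [List.reverse_singleton, List.singleton_append,
      PySem.List.enumerate_cons, PySem.List.enumerate_nil]
    by_cases hv : v = m
    · subst hv
      rw [PySem.List.index?_cons_self]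
      unfold lastIdxP
      rw [List.foldl_append]
      simp
    · have hmy : m ∈ ys := by
        rcases List.mem_append.mp hm with h | h
        · exact h
        · simp at h; exact absurd h.symm hv
      rw [PySem.List.index?_cons_of_ne _ hv]
      have hsome : (PySem.List.index? ys.reverse m).isSome := by
        rw [PySem.List.index?_isSome_iff]
        exact List.mem_reverse.mpr hmy
      rcases Option.isSome_iff_exists.mp hsome with ⟨k, hk⟩
      rw [hk]
      have hlast : lastIdxP (PySem.List.enumerate ys 0 ++ [((0 : Int) + ys.length, v)]) m d
          = lastIdxP (PySem.List.enumerate ys 0) m d := by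
        unfold lastIdxP
        rw [List.foldl_append]
        simp [hv]
      rw [hlast, ih hmy, hk]
      simp only [Option.map_some, Option.getD_some, List.length_append,
        List.length_singleton]
      push_cast
      ring

-- ===== VERDICT (by name: the statement is the Claim_ definition above) =====
theorem getMinNonZero_spec : Claim_equal_getMinNonZero := by
  intro x _ hpre
  unfold Spec_getMinNonZero getMinNonZero getMinNonZero_alt
  rcases hmx : PySem.List.max? x (fun y => y) with _ | mx
  · exact absurd ((PySem.List.max?_eq_none_iff x (fun y => y)).mp hmx) hpre
  dsimp only
  have hbridge :
      (PySem.List.pyRange 0 (x.length : Int) 1).foldl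
        (fun (s : Int × Int) i =>
          let v := PySem.List.pyGetD x i 0
          if v ≤ s.2 ∧ v ≠ 0 then (i, v) else s)
        (-1, mx)
      = loopE (PySem.List.enumerate x 0) (-1, mx) := by
    rw [loopE, PySem.List.enumerate_eq_map_pyRange (d := 0), List.foldl_map]
    simp only [PySem.List.len_eq]
  rw [hbridge, loopE_spec]
  have hfc : (PySem.List.enumerate x 0).filter (fun p => decide (p.2 ≤ mx ∧ p.2 ≠ 0))
      = (PySem.List.enumerate x 0).filter (fun p => decide (p.2 ≠ 0)) := by
    apply List.filter_congr
    intro p hp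
    have hpx : p.2 ∈ x := by
      rw [← PySem.List.map_snd_enumerate x 0]
      exact List.mem_map.mpr ⟨p, hp, rfl⟩
    have := PySem.List.max?_isMax hmx p.2 hpx
    by_cases h0 : p.2 = 0 <;> simp [h0, this]
  rw [hfc]
  have hnz : x.filter (fun v => decide (v ≠ 0))
      = ((PySem.List.enumerate x 0).filter (fun p => decide (p.2 ≠ 0))).map Prod.snd :=
    (enum_filter_snd (fun v => decide (v ≠ 0)) x 0).symm
  rcases hF : (PySem.List.enumerate x 0).filter (fun p => decide (p.2 ≠ 0)) with _ | ⟨q, qs⟩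
  · rw [hnz, hF]
    rfl
  · rw [hnz, hF, List.map_cons]
    rw [PySem.List.min?_id_cons]
    simp only []
    have hmv : (qs.map Prod.snd).foldl min q.2 = minVal qs q.2 := by
      rw [minVal, List.foldl_map]
    rw [hmv]
    have hmmem : minVal qs q.2 ∈ x := by
      rcases minVal_mem qs q.2 with h | ⟨p, hp, hp2⟩
      · have hq : q ∈ (PySem.List.enumerate x 0).filter (fun p => decide (p.2 ≠ 0)) := by
          rw [hF]; exact List.mem_cons_self ..
        have hqx : q.2 ∈ x := by
          rw [← PySem.List.map_snd_enumerate x 0]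
          exact List.mem_map.mpr ⟨q, (List.mem_filter.mp hq).1, rfl⟩
        rw [h]; exact hqx
      · have hp' : p ∈ (PySem.List.enumerate x 0).filter (fun r => decide (r.2 ≠ 0)) := by
          rw [hF]; exact List.mem_cons_of_mem _ hp
        have : p.2 ∈ x := by
          rw [← PySem.List.map_snd_enumerate x 0]
          exact List.mem_map.mpr ⟨p, (List.mem_filter.mp hp').1, rfl⟩
        rw [← hp2]; exact this
    rw [PySem.List.slice?_none_none_neg_one]
    simp only [Option.getD_some]
    exact congrArg (fun z => (z, minVal qs q.2).1) (lastIdxP_enum (minVal qs q.2) (-1) x hmmem)
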